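-- pv_equiv track=rewrite | github.com/Signbank/Global-signbank | signbank/csv_interface.py | normalize_field_choice
-- ===== SOURCE A (Python) =====
-- def normalize_field_choice(field_choice):
--     # add spaces around > and +
--
--     split_gt = field_choice.split('>')
--     trimmed_gt = [elt.strip() for elt in split_gt]
--     joined_gt = ' > '.join(trimmed_gt)
--
--     split_plus = joined_gt.split('+')
--     trimmed_plus = [elt.strip() for elt in split_plus]
--     joined_plus = ' + '.join(trimmed_plus)
--
--     return joined_plus
-- ===== SOURCE B (Python) =====
-- def normalize_field_choice(field_choice):
--     # Normalize each '+'-separated alternative on its own (spacing the '>'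
--     # steps inside it), then join the alternatives with ' + '.
--     def space_gt(part):
--         return ' > '.join(step.strip() for step in part.split('>')).strip()
--
--     return ' + '.join(space_gt(part) for part in field_choice.split('+'))
-- ===== Notes on version B (the rewrite author's own statement) =====
-- stated objective: simpler
-- what changed: Instead of A's two sequential whole-string passes (normalize around '>' over the full string, then re-split the intermediate around '+'), B splits on '+' once and normalizes each '+'-part independently with a small helper, joining the parts with ' + '; equivalence rests on a proved commutation of the two passes.
import Mathlib
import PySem

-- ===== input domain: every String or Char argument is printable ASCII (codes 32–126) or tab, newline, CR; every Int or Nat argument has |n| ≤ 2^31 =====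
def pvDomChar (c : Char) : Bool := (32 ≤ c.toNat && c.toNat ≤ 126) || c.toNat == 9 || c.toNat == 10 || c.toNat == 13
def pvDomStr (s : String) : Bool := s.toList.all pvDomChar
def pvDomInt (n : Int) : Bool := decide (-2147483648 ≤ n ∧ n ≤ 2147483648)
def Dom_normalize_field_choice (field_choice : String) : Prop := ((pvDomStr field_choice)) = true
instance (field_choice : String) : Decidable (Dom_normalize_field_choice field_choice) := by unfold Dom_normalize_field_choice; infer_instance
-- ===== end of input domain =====

-- B swaps A's two sequential whole-string passes for one split on '+' whose parts are each normalized around '>' independently; return values proved identical on all inputs.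

-- ===== PORT A =====
-- literal transliteration of A: split on '>', strip each piece, join with ' > '; then the same with '+' and ' + '
def normalize_field_choice (field_choice : String) : String :=
  let split_gt := PySem.Chars.splitOn field_choice.toList ['>']
  let trimmed_gt := split_gt.map PySem.Chars.strip
  let joined_gt := PySem.Chars.join [' ', '>', ' '] trimmed_gt
  let split_plus := PySem.Chars.splitOn joined_gt ['+']
  let trimmed_plus := split_plus.map PySem.Chars.strip
  let joined_plus := PySem.Chars.join [' ', '+', ' '] trimmed_plus
  String.ofList joined_plus

-- ===== PORT B =====
-- B-side helper: Source B's space_gt — normalize one '+'-part around '>'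
def nfcSpaceGt (part : List Char) : List Char :=
  PySem.Chars.strip (PySem.Chars.join [' ', '>', ' '] ((PySem.Chars.splitOn part ['>']).map PySem.Chars.strip))

def normalize_field_choice_alt (field_choice : String) : String :=
  String.ofList (PySem.Chars.join [' ', '+', ' '] ((PySem.Chars.splitOn field_choice.toList ['+']).map nfcSpaceGt))

-- ===== PRECONDITION & SPEC =====
def Spec_normalize_field_choice (field_choice : String) (out : String) : Prop := out = normalize_field_choice_alt field_choice
instance (field_choice : String) (out : String) : Decidable (Spec_normalize_field_choice field_choice out) := by unfold Spec_normalize_field_choice; infer_instance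

-- ===== CLAIM (what is proved, stated in full; the proofs are below) =====
def Claim_equal_normalize_field_choice : Prop := ∀ (field_choice : String), Dom_normalize_field_choice field_choice → Spec_normalize_field_choice field_choice (normalize_field_choice field_choice)

-- ===== LEMMAS AND PROOFS =====

lemma pv_go_spec (c : Char) : ∀ (fuel : Nat) (l cur : List Char) (acc : List (List Char)), l.length ≤ fuel →
    PySem.Chars.splitOn.go [c] fuel l cur acc = acc.reverse ++ (List.splitOn c l).modifyHead (cur.reverse ++ ·) := by
  intro fuel
  induction fuel with
  | zero =>
    intro l cur acc h
    have : l = [] := by cases l <;> simp_all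
    subst this
    simp [PySem.Chars.splitOn.go, List.splitOn, List.splitOnP_nil]
  | succ n ih =>
    intro l cur acc h
    cases l with
    | nil => simp [PySem.Chars.splitOn.go, List.splitOn, List.splitOnP_nil]
    | cons d rest =>
      by_cases hdc : d = c
      · subst hdc
        have hpre : List.isPrefixOf [d] (d :: rest) = true := by simp [List.isPrefixOf]
        rw [PySem.Chars.splitOn.go]
        simp only [hpre, if_true]
        rw [ih _ _ _ (by simpa using Nat.le_of_succ_le_succ h)]
        simp [List.splitOn, List.splitOnP_cons]
        cases List.splitOnP (fun x => x == d) rest <;> simp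
      · have hpre : List.isPrefixOf [c] (d :: rest) = false := by simp [List.isPrefixOf]; exact fun h => absurd h.symm hdc
        rw [PySem.Chars.splitOn.go]
        simp only [hpre, Bool.false_eq_true, if_false]
        rw [ih _ _ _ (by simpa using Nat.le_of_succ_le_succ h)]
        have hne : List.splitOnP (· == c) rest ≠ [] := by
          simp [List.splitOnP]; exact List.splitOnP.go_ne_nil _ _ _
        obtain ⟨x, xs, hx⟩ := List.exists_cons_of_ne_nil hne
        simp [List.splitOn, List.splitOnP_cons, hdc, hx]

lemma pv_splitOn_bridge (c : Char) (s : List Char) : PySem.Chars.splitOn s [c] = List.splitOn c s := by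
  rw [PySem.Chars.splitOn, pv_go_spec c _ _ _ _ (by omega)]
  have hne : List.splitOn c s ≠ [] := by
    simp [List.splitOn, List.splitOnP]; exact List.splitOnP.go_ne_nil _ _ _
  obtain ⟨x, xs, hx⟩ := List.exists_cons_of_ne_nil hne
  simp [hx]

lemma pv_splitOn_ne_nil (c : Char) (s : List Char) : List.splitOn c s ≠ [] := by
  simp only [List.splitOn, List.splitOnP]
  exact List.splitOnP.go_ne_nil _ _ _

lemma pv_splitOn_concat_self (c : Char) (s : List Char) : List.splitOn c (s ++ [c]) = List.splitOn c s ++ [[]] := by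
  have h := List.splitOnP_append_cons (fun x => x == c) s [] c (by simp)
  simpa [List.splitOn, List.splitOnP_nil] using h

lemma pv_splitOn_concat_ne (c d : Char) (hdc : d ≠ c) (s : List Char) :
    List.splitOn c (s ++ [d]) = (List.splitOn c s).modifyLast (· ++ [d]) := by
  induction s with
  | nil =>
    rw [show (List.splitOn c ([] ++ [d])) = [[d]] by simp [List.splitOn, List.splitOnP_cons, List.splitOnP_nil, hdc],
      show (List.splitOn c []) = [] ++ [([] : List Char)] by simp [List.splitOn, List.splitOnP_nil],
      List.modifyLast_concat]
    simp
  | cons a s ih =>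
    rcases (List.eq_nil_or_concat (List.splitOn c s)).resolve_left (pv_splitOn_ne_nil c s) with ⟨ys, y, hys⟩
    simp only [List.concat_eq_append] at hys
    by_cases hac : a = c
    · have h1 : List.splitOn c ((a :: s) ++ [d]) = [] :: List.splitOn c (s ++ [d]) := by
        simp [List.splitOn, List.splitOnP_cons, hac]
      have h2 : List.splitOn c (a :: s) = [] :: List.splitOn c s := by
        simp [List.splitOn, List.splitOnP_cons, hac]
      rw [h1, ih, h2, hys]
      rw [show (([] : List Char) :: (ys ++ [y])) = (([] :: ys) ++ [y]) by simp,
        List.modifyLast_concat, List.modifyLast_concat]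
      simp
    · have h1 : List.splitOn c ((a :: s) ++ [d]) = (List.splitOn c (s ++ [d])).modifyHead (a :: ·) := by
        simp [List.splitOn, List.splitOnP_cons, hac]
      have h2 : List.splitOn c (a :: s) = (List.splitOn c s).modifyHead (a :: ·) := by
        simp [List.splitOn, List.splitOnP_cons, hac]
      rw [h1, ih, h2, hys]
      cases ys with
      | nil =>
        rw [List.modifyLast_concat]
        simp [List.modifyLast, List.modifyLast.go]
      | cons z zs =>
        rw [List.modifyLast_concat]
        simp only [List.cons_append, List.modifyHead_cons]
        rw [show ((a :: z) :: (zs ++ [y])) = (((a :: z) :: zs) ++ [y]) by simp, List.modifyLast_concat]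
        simp

lemma pv_splitOn_last (c : Char) (s : List Char) :
    ∃ ys y, List.splitOn c s = ys ++ [y] ∧ c ∉ y ∧
      ((ys = [] ∧ y = s ∧ c ∉ s) ∨ (ys ≠ [] ∧ ∃ pre, s = pre ++ [c] ++ y)) := by
  induction s with
  | nil => exact ⟨[], [], by simp [List.splitOn, List.splitOnP_nil], by simp, Or.inl ⟨rfl, rfl, by simp⟩⟩
  | cons a s ih =>
    obtain ⟨ys, y, hsp, hcy, hcase⟩ := ih
    by_cases hac : a = c
    · have h2 : List.splitOn c (a :: s) = [] :: List.splitOn c s := by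
        simp [List.splitOn, List.splitOnP_cons, hac]
      refine ⟨[] :: ys, y, by rw [h2, hsp]; rfl, hcy, Or.inr ⟨by simp, ?_⟩⟩
      rcases hcase with ⟨_, hys, _⟩ | ⟨_, pre, hpre⟩
      · exact ⟨[], by simp [hys, hac]⟩
      · exact ⟨a :: pre, by simp [hpre]⟩
    · have h2 : List.splitOn c (a :: s) = (List.splitOn c s).modifyHead (a :: ·) := by
        simp [List.splitOn, List.splitOnP_cons, hac]
      rcases hcase with ⟨hys, hy, hcs⟩ | ⟨hysne, pre, hpre⟩
      · subst hys; subst hy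
        refine ⟨[], a :: y, ?_, ?_, Or.inl ⟨rfl, rfl, ?_⟩⟩
        · rw [h2, hsp]; simp
        · intro hm
          rcases List.mem_cons.mp hm with h | h
          · exact hac h.symm
          · exact hcy h
        · intro hm
          rcases List.mem_cons.mp hm with h | h
          · exact hac h.symm
          · exact hcs h
      · cases ys with
        | nil => exact absurd rfl hysne
        | cons z zs =>
          refine ⟨(a :: z) :: zs, y, ?_, hcy, Or.inr ⟨by simp, a :: pre, by simp [hpre]⟩⟩
          rw [h2, hsp]; simp

lemma pv_intercalate_concat (sep y : List Char) (t : List (List Char)) (ht : t ≠ []) :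
    List.intercalate sep (t ++ [y]) = List.intercalate sep t ++ sep ++ y := by
  induction t with
  | nil => exact absurd rfl ht
  | cons a t ih =>
    cases t with
    | nil => simp [List.intercalate]
    | cons b t2 =>
      have h := ih (by simp)
      simp only [List.cons_append] at h ⊢
      simp [List.intercalate] at h ⊢
      simp [h]

inductive NfcLast | none | gt | plus
deriving DecidableEq, Repr

def pvAllWs (s : List Char) : Bool := s.all PySem.Chars.isspace
def pvWsTail (s : List Char) : List Char := (s.reverse.takeWhile PySem.Chars.isspace).reverse
def pvClassify (s : List Char) : NfcLast :=
  match s.reverse.dropWhile PySem.Chars.isspace with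
  | [] => NfcLast.none
  | c :: _ => if c = '>' then NfcLast.gt else if c = '+' then NfcLast.plus else NfcLast.none
def pvPad : NfcLast → List Char
  | NfcLast.gt => [' ']
  | _ => []
def pvPend (s : List Char) : List Char :=
  if pvAllWs s = false ∧ pvClassify s = NfcLast.none then pvWsTail s else []

lemma pv_takeWhile_not_all {α : Type} (p : α → Bool) (l₁ l₂ : List α) (h : l₁.all p = false) :
    (l₁ ++ l₂).takeWhile p = l₁.takeWhile p := by
  induction l₁ with
  | nil => simp at h
  | cons a t ih =>
    by_cases hp : p a
    · simp only [List.all_cons, hp, Bool.true_and] at h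
      simp only [List.cons_append, List.takeWhile_cons, hp, if_true]
      rw [ih h]
    · simp [List.takeWhile_cons, hp]

-- s = rstrip s ++ wsTail s
lemma pv_rstrip_wsTail (s : List Char) : PySem.Chars.rstrip s ++ pvWsTail s = s := by
  rw [PySem.Chars.rstrip, pvWsTail, ← List.reverse_append, List.takeWhile_append_dropWhile,
    List.reverse_reverse]

lemma pv_allWs_wsTail (s : List Char) : pvAllWs (pvWsTail s) = true := by
  simp only [pvAllWs, pvWsTail, List.all_reverse]
  simp [List.all_eq_true]

lemma pv_lstrip_allws (s : List Char) (h : pvAllWs s = true) : PySem.Chars.lstrip s = [] := by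
  simp only [PySem.Chars.lstrip, List.dropWhile_eq_nil_iff]
  simpa [pvAllWs, List.all_eq_true] using h

lemma pv_strip_allws (s : List Char) (h : pvAllWs s = true) : PySem.Chars.strip s = [] := by
  simp [PySem.Chars.strip, pv_lstrip_allws s h, PySem.Chars.rstrip]

lemma pv_allWs_append (x y : List Char) : pvAllWs (x ++ y) = (pvAllWs x && pvAllWs y) := by
  simp [pvAllWs]

lemma pv_wsTail_append (x y : List Char) (hy : pvAllWs y = false) : pvWsTail (x ++ y) = pvWsTail y := by
  simp only [pvWsTail, List.reverse_append]
  rw [pv_takeWhile_not_all _ _ _ (by simpa [pvAllWs] using hy)]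

-- lstrip l = strip l ++ (wsTail of l, when l is not all whitespace)
lemma pv_lstrip_eq_strip_wsTail (l : List Char) (h : pvAllWs l = false) :
    PySem.Chars.lstrip l = PySem.Chars.strip l ++ pvWsTail l := by
  have h1 : PySem.Chars.strip l ++ pvWsTail (PySem.Chars.lstrip l) = PySem.Chars.lstrip l := by
    rw [PySem.Chars.strip]; exact pv_rstrip_wsTail _
  have h2 : pvAllWs (PySem.Chars.lstrip l) = false := by
    simp only [pvAllWs, PySem.Chars.lstrip] at h ⊢
    simp [List.all_eq_true] at h ⊢
    obtain ⟨a, ha, hpa⟩ := h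
    refine ⟨a, ?_, hpa⟩
    have : a ∈ l.dropWhile PySem.Chars.isspace ∨ a ∈ l.takeWhile PySem.Chars.isspace := by
      have := List.takeWhile_append_dropWhile (p := PySem.Chars.isspace) (l := l)
      rw [← this] at ha
      rcases List.mem_append.mp ha with h' | h'
      · exact Or.inr h'
      · exact Or.inl h'
    rcases this with h' | h'
    · exact h'
    · exact absurd (List.mem_takeWhile_imp h') (by simp [hpa])
  have h3 : pvWsTail (PySem.Chars.lstrip l) = pvWsTail l := by
    conv_rhs => rw [show l = l.takeWhile PySem.Chars.isspace ++ PySem.Chars.lstrip l from (List.takeWhile_append_dropWhile).symm]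
    rw [pv_wsTail_append _ _ h2]
  rw [← h3, h1]

lemma pv_strip_concat_ws (d : Char) (l : List Char) (hd : PySem.Chars.isspace d = true) :
    PySem.Chars.strip (l ++ [d]) = PySem.Chars.strip l := by
  simp [PySem.Chars.strip, PySem.Chars.rstrip, PySem.Chars.lstrip]
  rw [List.dropWhile_append]
  by_cases h : (l.dropWhile PySem.Chars.isspace).isEmpty
  · simp [h, List.dropWhile_cons, hd, List.isEmpty_iff.mp h]
  · simp [h, hd]

lemma pv_strip_concat_nonws (d : Char) (l : List Char) (hd : PySem.Chars.isspace d = false) :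
    PySem.Chars.strip (l ++ [d]) = PySem.Chars.lstrip l ++ [d] := by
  simp only [PySem.Chars.strip, PySem.Chars.lstrip, PySem.Chars.rstrip]
  rw [List.dropWhile_append]
  by_cases h : (l.dropWhile PySem.Chars.isspace).isEmpty
  · simp [h, List.dropWhile_cons, hd, List.isEmpty_iff.mp h]
  · simp [h, List.dropWhile_cons, hd]

lemma pv_wsTail_concat_nonws (c : Char) (s : List Char) (h : PySem.Chars.isspace c = false) :
    pvWsTail (s ++ [c]) = [] := by
  simp [pvWsTail, List.takeWhile_cons, h]

lemma pv_allWs_concat (c : Char) (s : List Char) :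
    pvAllWs (s ++ [c]) = (pvAllWs s && PySem.Chars.isspace c) := by
  simp [pvAllWs]

def pvP (c : Char) (sep : List Char) (s : List Char) : List Char :=
  List.intercalate sep ((List.splitOn c s).map PySem.Chars.strip)

lemma pvP_concat_self (c : Char) (sep s : List Char) :
    pvP c sep (s ++ [c]) = pvP c sep s ++ sep := by
  rw [pvP, pv_splitOn_concat_self, List.map_append]
  simp only [List.map_cons, List.map_nil]
  rw [pv_intercalate_concat _ _ _ (by simp [pv_splitOn_ne_nil])]
  simp [pvP, PySem.Chars.strip, PySem.Chars.lstrip, PySem.Chars.rstrip]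

lemma pvP_concat_ws (c d : Char) (sep s : List Char) (hd : PySem.Chars.isspace d = true)
    (hdc : d ≠ c) : pvP c sep (s ++ [d]) = pvP c sep s := by
  rcases (List.eq_nil_or_concat (List.splitOn c s)).resolve_left (pv_splitOn_ne_nil c s) with ⟨ys, y, hys⟩
  simp only [List.concat_eq_append] at hys
  rw [pvP, pvP, pv_splitOn_concat_ne c d hdc, hys, List.modifyLast_concat, List.map_append,
    List.map_append]
  simp only [List.map_cons, List.map_nil]
  rw [pv_strip_concat_ws d y hd]

lemma pvP_append_allws (c : Char) (sep s v : List Char) (hv : pvAllWs v = true)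
    (hc : PySem.Chars.isspace c = false) : pvP c sep (s ++ v) = pvP c sep s := by
  induction v using List.reverseRecOn with
  | nil => simp
  | append_singleton v d ih =>
    rw [pv_allWs_concat, Bool.and_eq_true] at hv
    have hd : PySem.Chars.isspace d = true := hv.2
    rw [← List.append_assoc, pvP_concat_ws c d sep (s ++ v) hd (by intro h; rw [h] at hd; simp [hc] at hd),
      ih hv.1]

lemma pvP_concat_nonws (c d : Char) (sep s : List Char) (ys : List (List Char)) (y : List Char)
    (hd : PySem.Chars.isspace d = false) (hdc : d ≠ c)
    (hsp : List.splitOn c s = ys ++ [y]) (hsuf : y <:+ s) :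
    pvP c sep (s ++ [d]) = pvP c sep s ++ (if pvAllWs y = true then [] else pvWsTail s) ++ [d] := by
  rw [pvP, pvP, pv_splitOn_concat_ne c d hdc, hsp, List.modifyLast_concat, List.map_append,
    List.map_append]
  simp only [List.map_cons, List.map_nil]
  rw [pv_strip_concat_nonws d y hd]
  by_cases hA : pvAllWs y = true
  · rw [pv_lstrip_allws y hA, pv_strip_allws y hA]
    cases ys with
    | nil => simp [List.intercalate, hA]
    | cons z zs =>
      rw [pv_intercalate_concat _ _ _ (by simp), pv_intercalate_concat _ _ _ (by simp)]
      simp [hA]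
  · have hA' : pvAllWs y = false := by simpa using hA
    obtain ⟨pre, hpre⟩ := hsuf
    have hws : pvWsTail y = pvWsTail s := by rw [← hpre, pv_wsTail_append pre y hA']
    rw [pv_lstrip_eq_strip_wsTail y hA', hws]
    cases ys with
    | nil => simp [List.intercalate, hA']
    | cons z zs =>
      rw [pv_intercalate_concat _ _ _ (by simp), pv_intercalate_concat _ _ _ (by simp)]
      simp [hA']

lemma pvP_allws (c : Char) (sep s : List Char) (h : pvAllWs s = true)
    (hc : PySem.Chars.isspace c = false) : pvP c sep s = [] := by
  obtain ⟨ys, y, hsp, hcy, hcase⟩ := pv_splitOn_last c s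
  have hcs : c ∉ s := by
    intro hm
    have := List.all_eq_true.mp (by simpa [pvAllWs] using h) c hm
    simp [hc] at this
  rcases hcase with ⟨hys, hy, _⟩ | ⟨_, pre, hpre⟩
  · subst hys; subst hy
    rw [pvP, hsp]
    simp [List.intercalate, pv_strip_allws _ h]
  · exact absurd (by simp [hpre] : c ∈ s) hcs

lemma pv_takeWhile_all {α : Type} (p : α → Bool) (l₁ l₂ : List α) (h : l₁.all p = true) :
    (l₁ ++ l₂).takeWhile p = l₁ ++ l₂.takeWhile p := by
  induction l₁ with
  | nil => simp
  | cons a t ih =>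
    simp only [List.all_cons, Bool.and_eq_true] at h
    simp [List.takeWhile_cons, h.1, ih h.2]

def pvLastTok (c : Char) (z : List Char) : List Char :=
  (z.reverse.takeWhile (fun d => !(d == c))).reverse

lemma pv_lastTok_eq (c : Char) (z : List Char) (ys : List (List Char)) (y : List Char)
    (hcy : c ∉ y)
    (hcase : (ys = [] ∧ y = z ∧ c ∉ z) ∨ (ys ≠ [] ∧ ∃ pre, z = pre ++ [c] ++ y)) :
    y = pvLastTok c z := by
  rcases hcase with ⟨_, hy, hcz⟩ | ⟨_, pre, hpre⟩
  · subst hy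
    rw [pvLastTok, List.takeWhile_eq_self_iff.mpr ?_, List.reverse_reverse]
    intro a ha
    simp only [Bool.not_eq_eq_eq_not, Bool.not_true, beq_eq_false_iff_ne, ne_eq]
    intro h; exact hcz (h ▸ (List.mem_reverse.mp ha))
  · subst hpre
    rw [pvLastTok]
    simp only [List.reverse_append, List.reverse_cons, List.reverse_nil, List.nil_append,
      List.append_assoc, List.cons_append]
    rw [pv_takeWhile_all _ _ _ ?hall]
    · simp [List.takeWhile_cons]
    · case hall =>
      simp only [List.all_eq_true, List.mem_reverse]
      intro a ha
      simp only [Bool.not_eq_eq_eq_not, Bool.not_true, beq_eq_false_iff_ne, ne_eq]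
      intro h; exact hcy (h ▸ ha)

lemma pv_classify_allws (s : List Char) (h : pvAllWs s = true) : pvClassify s = NfcLast.none := by
  simp only [pvClassify]
  have : s.reverse.dropWhile PySem.Chars.isspace = [] := by
    simp only [List.dropWhile_eq_nil_iff]
    intro a ha
    exact List.all_eq_true.mp (by simpa [pvAllWs] using h) a (List.mem_reverse.mp ha)
  rw [this]

-- trailing whitespace of  a ++ [e] ++ w  (e not whitespace, w all whitespace) is exactly w
lemma pv_wsTail_trailing (a w : List Char) (e : Char) (he : PySem.Chars.isspace e = false)
    (hw : pvAllWs w = true) : pvWsTail (a ++ [e] ++ w) = w := by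
  simp only [pvWsTail, List.reverse_append, List.reverse_cons, List.reverse_nil, List.nil_append,
    List.append_assoc, List.cons_append]
  rw [pv_takeWhile_all _ _ _ (by simpa [pvAllWs, List.all_reverse] using hw)]
  simp [List.takeWhile_cons, he]

-- the shape of a string by its classification
lemma pv_shape (s : List Char) :
    pvAllWs s = true ∨
    ∃ x e w, s = x ++ [e] ++ w ∧ PySem.Chars.isspace e = false ∧ pvAllWs w = true ∧ w = pvWsTail s ∧
      pvClassify s = (if e = '>' then NfcLast.gt else if e = '+' then NfcLast.plus else NfcLast.none) := by
  rcases hd : s.reverse.dropWhile PySem.Chars.isspace with _ | ⟨e, es⟩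
  · left
    simp only [List.dropWhile_eq_nil_iff] at hd
    simp only [pvAllWs, List.all_eq_true]
    intro a ha
    exact hd a (by simpa using ha)
  · right
    have he : PySem.Chars.isspace e = false := by
      have h1 := List.dropWhile_get_zero_not (p := PySem.Chars.isspace) (l := s.reverse)
        (by simp [hd])
      simpa [hd] using h1
    have hsplit : s.reverse = s.reverse.takeWhile PySem.Chars.isspace ++ (e :: es) := by
      rw [← hd, List.takeWhile_append_dropWhile]
    have hs : s = es.reverse ++ [e] ++ (s.reverse.takeWhile PySem.Chars.isspace).reverse := by
      have := congrArg List.reverse hsplit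
      simpa [List.append_assoc] using this
    refine ⟨es.reverse, e, pvWsTail s, by simpa [pvWsTail] using hs, he, pv_allWs_wsTail s, rfl, ?_⟩
    simp only [pvClassify, hd]

def pvAC (s : List Char) : List Char :=
  pvP '+' [' ', '+', ' '] (pvP '>' [' ', '>', ' '] s)

lemma pv_lastTok_ext (c : Char) (q tail : List Char) (h : tail.all (fun d => !(d == c)) = true) :
    pvLastTok c (q ++ tail) = pvLastTok c q ++ tail := by
  simp only [pvLastTok, List.reverse_append]
  rw [pv_takeWhile_all _ _ _ (by simpa [List.all_reverse] using h)]
  simp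

lemma pv_lastTok_stop (c : Char) (q tail : List Char) (h : tail.all (fun d => !(d == c)) = true) :
    pvLastTok c ((q ++ [c]) ++ tail) = tail := by
  simp only [pvLastTok, List.reverse_append]
  rw [pv_takeWhile_all _ _ _ (by simpa [List.all_reverse] using h)]
  simp [List.takeWhile_cons]

lemma pv_suffix_of_last (c : Char) (z : List Char) (ys : List (List Char)) (y : List Char)
    (hcase : (ys = [] ∧ y = z ∧ c ∉ z) ∨ (ys ≠ [] ∧ ∃ pre, z = pre ++ [c] ++ y)) : y <:+ z := by
  rcases hcase with ⟨_, hy, _⟩ | ⟨_, pre, hpre⟩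
  · exact hy ▸ List.suffix_refl _
  · exact ⟨pre ++ [c], by simp [hpre]⟩

lemma pv_LA_ws (c : Char) (s : List Char) (hc : PySem.Chars.isspace c = true) :
    pvAC (s ++ [c]) = pvAC s := by
  have hcg : c ≠ '>' := by intro h; rw [h] at hc; exact absurd hc (by decide)
  rw [pvAC, pvP_concat_ws '>' c _ s hc hcg]
  rfl

lemma pv_LA_plus (s : List Char) : pvAC (s ++ ['+']) = pvAC s ++ [' ', '+', ' '] := by
  obtain ⟨ys, y, hsp, hcy, hcase⟩ := pv_splitOn_last '>' s
  have hsuf : y <:+ s := pv_suffix_of_last '>' s ys y hcase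
  have h1 := pvP_concat_nonws '>' '+' [' ', '>', ' '] s ys y (by decide) (by decide) hsp hsuf
  have hV : pvAllWs (if pvAllWs y = true then [] else pvWsTail s) = true := by
    by_cases h : pvAllWs y = true
    · rw [if_pos h]; rfl
    · rw [if_neg h]; exact pv_allWs_wsTail s
  rw [pvAC, h1, show pvP '>' [' ', '>', ' '] s ++ (if pvAllWs y = true then [] else pvWsTail s) ++ ['+']
      = (pvP '>' [' ', '>', ' '] s ++ (if pvAllWs y = true then [] else pvWsTail s)) ++ ['+'] by
      simp [List.append_assoc],
    pvP_concat_self, pvP_append_allws _ _ _ _ hV (by decide)]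
  rfl

lemma pv_allWs_shape_false (x w : List Char) (e : Char) (he : PySem.Chars.isspace e = false) :
    pvAllWs (x ++ [e] ++ w) = false := by
  rw [pv_allWs_append, pv_allWs_append]
  simp [pvAllWs, he]

lemma pv_P2_gtSep (t : List Char) :
    pvP '+' [' ', '+', ' '] (t ++ [' ', '>', ' ']) =
      pvP '+' [' ', '+', ' '] t ++
        (if pvAllWs (pvLastTok '+' (t ++ [' '])) = true then [] else pvWsTail (t ++ [' '])) ++ ['>'] := by
  obtain ⟨ys, y, hsp, hcy, hcase⟩ := pv_splitOn_last '+' (t ++ [' '])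
  have hy := pv_lastTok_eq '+' _ ys y hcy hcase
  have hsuf := pv_suffix_of_last '+' _ ys y hcase
  have h1 := pvP_concat_nonws '+' '>' [' ', '+', ' '] (t ++ [' ']) ys y (by decide) (by decide) hsp hsuf
  have hshape : t ++ [' ', '>', ' '] = (((t ++ [' ']) ++ ['>']) ++ [' ']) := by simp
  rw [hshape, pvP_concat_ws '+' ' ' _ _ (by decide) (by decide), h1,
    pvP_concat_ws '+' ' ' _ _ (by decide) (by decide), hy]

lemma pv_P2_step (t V₁ : List Char) (c : Char) (hV : pvAllWs V₁ = true)
    (hc : PySem.Chars.isspace c = false) (hcp : c ≠ '+') :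
    pvP '+' [' ', '+', ' '] ((t ++ V₁) ++ [c]) =
      pvP '+' [' ', '+', ' '] t ++
        (if pvAllWs (pvLastTok '+' (t ++ V₁)) = true then [] else pvWsTail (t ++ V₁)) ++ [c] := by
  obtain ⟨ys, y, hsp, hcy, hcase⟩ := pv_splitOn_last '+' (t ++ V₁)
  have hy := pv_lastTok_eq '+' _ ys y hcy hcase
  have hsuf := pv_suffix_of_last '+' _ ys y hcase
  have h1 := pvP_concat_nonws '+' c [' ', '+', ' '] (t ++ V₁) ys y hc hcp hsp hsuf
  rw [h1, pvP_append_allws '+' _ t V₁ hV (by decide), hy]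

lemma pv_allws_all_ne (v : List Char) (c : Char) (hv : pvAllWs v = true)
    (hc : PySem.Chars.isspace c = false) : v.all (fun d => !(d == c)) = true := by
  simp only [pvAllWs, List.all_eq_true] at hv
  simp only [List.all_eq_true]
  intro a ha
  simp only [Bool.not_eq_eq_eq_not, Bool.not_true, beq_eq_false_iff_ne, ne_eq]
  intro h
  subst h
  exact absurd (hv a ha) (by simp [hc])

lemma pv_not_mem_allws (s : List Char) (c : Char) (hs : pvAllWs s = true)
    (hc : PySem.Chars.isspace c = false) : c ∉ s := by
  intro hm
  simp only [pvAllWs, List.all_eq_true] at hs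
  exact absurd (hs c hm) (by simp [hc])

lemma pv_LA_gt (s : List Char) :
    pvAC (s ++ ['>']) = pvAC s ++ pvPad (pvClassify s) ++
      (if pvAllWs s = true ∨ pvClassify s = NfcLast.plus then ['>'] else [' ', '>']) := by
  rcases pv_shape s with hall | ⟨x, e, w, hs, he, hw, hwT, hcls⟩
  · have ht : pvP '>' [' ', '>', ' '] s = [] := pvP_allws _ _ _ hall (by decide)
    have hAC : pvAC s = [] := by rw [pvAC, ht]; rfl
    rw [pvAC, pvP_concat_self, ht, List.nil_append, hAC, pv_classify_allws s hall,
      if_pos (Or.inl hall)]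
    decide
  · have hnws : pvAllWs s = false := by rw [hs]; exact pv_allWs_shape_false x w e he
    have ht0 : pvP '>' [' ', '>', ' '] s = pvP '>' [' ', '>', ' '] (x ++ [e]) := by
      rw [hs]; exact pvP_append_allws '>' _ (x ++ [e]) w hw (by decide)
    rw [pvAC, pvP_concat_self, pv_P2_gtSep]
    by_cases he1 : e = '>'
    · subst he1
      have ht : pvP '>' [' ', '>', ' '] s = pvP '>' [' ', '>', ' '] x ++ [' ', '>', ' '] := by
        rw [ht0, pvP_concat_self]
      have hcls' : pvClassify s = NfcLast.gt := by rw [hcls]; simp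
      have hlt : pvLastTok '+' (pvP '>' [' ', '>', ' '] s ++ [' '])
          = pvLastTok '+' (pvP '>' [' ', '>', ' '] x) ++ [' ', '>', ' ', ' '] := by
        rw [ht, show pvP '>' [' ', '>', ' '] x ++ [' ', '>', ' '] ++ [' ']
            = pvP '>' [' ', '>', ' '] x ++ [' ', '>', ' ', ' '] by simp]
        exact pv_lastTok_ext '+' _ [' ', '>', ' ', ' '] (by decide)
      have hA2 : pvAllWs (pvLastTok '+' (pvP '>' [' ', '>', ' '] s ++ [' '])) = false := by
        rw [hlt, pv_allWs_append]
        simp [show pvAllWs [' ', '>', ' ', ' '] = false by decide]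
      have hwz : pvWsTail (pvP '>' [' ', '>', ' '] s ++ [' ']) = [' ', ' '] := by
        rw [ht, show pvP '>' [' ', '>', ' '] x ++ [' ', '>', ' '] ++ [' ']
            = (pvP '>' [' ', '>', ' '] x ++ [' ']) ++ ['>'] ++ [' ', ' '] by simp]
        exact pv_wsTail_trailing _ [' ', ' '] '>' (by decide) (by decide)
      rw [hA2, hwz, hcls']
      rw [if_neg (show ¬(pvAllWs s = true ∨ NfcLast.gt = NfcLast.plus) by simp [hnws])]
      simp [pvAC, pvPad]
    · obtain ⟨ys1, y1, hsp1, hcy1, hcase1⟩ := pv_splitOn_last '>' x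
      have hsuf1 := pv_suffix_of_last '>' x ys1 y1 hcase1
      have ht : pvP '>' [' ', '>', ' '] s
          = (pvP '>' [' ', '>', ' '] x ++ (if pvAllWs y1 = true then [] else pvWsTail x)) ++ [e] := by
        rw [ht0, pvP_concat_nonws '>' e [' ', '>', ' '] x ys1 y1 he he1 hsp1 hsuf1]
      by_cases he2 : e = '+'
      · subst he2
        have hcls' : pvClassify s = NfcLast.plus := by rw [hcls]; simp
        have hlt : pvLastTok '+' (pvP '>' [' ', '>', ' '] s ++ [' ']) = [' '] := by
          rw [ht]
          exact pv_lastTok_stop '+' _ [' '] (by decide)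
        rw [hlt, hcls']
        rw [if_pos (show (pvAllWs s = true ∨ NfcLast.plus = NfcLast.plus) from Or.inr rfl)]
        rw [if_pos (show pvAllWs [' '] = true by decide)]
        simp [pvAC, pvPad]
      · have hcls' : pvClassify s = NfcLast.none := by rw [hcls]; simp [he1, he2]
        have hlt : pvLastTok '+' (pvP '>' [' ', '>', ' '] s ++ [' '])
            = pvLastTok '+' (pvP '>' [' ', '>', ' '] x ++ (if pvAllWs y1 = true then [] else pvWsTail x)) ++ [e, ' '] := by
          rw [ht, show ((pvP '>' [' ', '>', ' '] x ++ (if pvAllWs y1 = true then [] else pvWsTail x)) ++ [e]) ++ [' ']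
              = (pvP '>' [' ', '>', ' '] x ++ (if pvAllWs y1 = true then [] else pvWsTail x)) ++ [e, ' '] by simp]
          exact pv_lastTok_ext '+' _ [e, ' '] (by simp [he2])
        have hA2 : pvAllWs (pvLastTok '+' (pvP '>' [' ', '>', ' '] s ++ [' '])) = false := by
          rw [hlt, pv_allWs_append]
          simp [pvAllWs, he]
        have hwz : pvWsTail (pvP '>' [' ', '>', ' '] s ++ [' ']) = [' '] := by
          rw [ht, show ((pvP '>' [' ', '>', ' '] x ++ (if pvAllWs y1 = true then [] else pvWsTail x)) ++ [e]) ++ [' ']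
              = (pvP '>' [' ', '>', ' '] x ++ (if pvAllWs y1 = true then [] else pvWsTail x)) ++ [e] ++ [' '] by simp]
          exact pv_wsTail_trailing _ [' '] e he (by decide)
        rw [hA2, hwz, hcls']
        rw [if_neg (show ¬(pvAllWs s = true ∨ NfcLast.none = NfcLast.plus) by simp [hnws])]
        simp [pvAC, pvPad]

lemma pv_LA_norm (c : Char) (s : List Char) (hc : PySem.Chars.isspace c = false)
    (hc1 : c ≠ '>') (hc2 : c ≠ '+') :
    pvAC (s ++ [c]) = pvAC s ++ pvPad (pvClassify s) ++ pvPend s ++ [c] := by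
  obtain ⟨ys, y, hsp, hcy, hcase⟩ := pv_splitOn_last '>' s
  have hy := pv_lastTok_eq '>' s ys y hcy hcase
  have hsuf := pv_suffix_of_last '>' s ys y hcase
  have h1 := pvP_concat_nonws '>' c [' ', '>', ' '] s ys y hc hc1 hsp hsuf
  have hV1 : pvAllWs (if pvAllWs y = true then [] else pvWsTail s) = true := by
    by_cases h : pvAllWs y = true
    · rw [if_pos h]; rfl
    · rw [if_neg h]; exact pv_allWs_wsTail s
  rw [pvAC, h1, show pvP '>' [' ', '>', ' '] s ++ (if pvAllWs y = true then [] else pvWsTail s) ++ [c]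
      = (pvP '>' [' ', '>', ' '] s ++ (if pvAllWs y = true then [] else pvWsTail s)) ++ [c] by simp,
    pv_P2_step _ _ c hV1 hc hc2]
  rcases pv_shape s with hall | ⟨x, e, w, hs, he, hw, hwT, hcls⟩
  · -- s is all whitespace
    have hys : y = s := by
      rcases hcase with ⟨_, h', _⟩ | ⟨_, pre, hpre⟩
      · exact h'
      · exact absurd (by simp [hpre] : '>' ∈ s) (pv_not_mem_allws s '>' hall (by decide))
    have hV : (if pvAllWs y = true then [] else pvWsTail s) = ([] : List Char) := by
      rw [hys, if_pos hall]
    have ht : pvP '>' [' ', '>', ' '] s = [] := pvP_allws _ _ _ hall (by decide)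
    rw [hV, ht]
    rw [if_pos (show pvAllWs (pvLastTok '+' (([] : List Char) ++ [])) = true by decide)]
    simp [pvAC, ht, pvPad, pvPend, pv_classify_allws s hall, hall]
  · have hnws : pvAllWs s = false := by rw [hs]; exact pv_allWs_shape_false x w e he
    have ht0 : pvP '>' [' ', '>', ' '] s = pvP '>' [' ', '>', ' '] (x ++ [e]) := by
      rw [hs]; exact pvP_append_allws '>' _ (x ++ [e]) w hw (by decide)
    by_cases he1 : e = '>'
    · subst he1
      have ht : pvP '>' [' ', '>', ' '] s = pvP '>' [' ', '>', ' '] x ++ [' ', '>', ' '] := by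
        rw [ht0, pvP_concat_self]
      have hcls' : pvClassify s = NfcLast.gt := by rw [hcls]; simp
      have hyw : y = w := by
        rw [hy, hs]
        exact pv_lastTok_stop '>' x w (pv_allws_all_ne w '>' hw (by decide))
      have hV : (if pvAllWs y = true then [] else pvWsTail s) = ([] : List Char) := by
        rw [hyw, if_pos hw]
      rw [hV, List.append_nil]
      have hlt : pvLastTok '+' (pvP '>' [' ', '>', ' '] s)
          = pvLastTok '+' (pvP '>' [' ', '>', ' '] x) ++ [' ', '>', ' '] := by
        rw [ht]
        exact pv_lastTok_ext '+' _ [' ', '>', ' '] (by decide)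
      rw [if_neg (show ¬ pvAllWs (pvLastTok '+' (pvP '>' [' ', '>', ' '] s)) = true by
        rw [hlt, pv_allWs_append]; simp [show pvAllWs [' ', '>', ' '] = false by decide])]
      have hwz : pvWsTail (pvP '>' [' ', '>', ' '] s) = [' '] := by
        rw [ht, show pvP '>' [' ', '>', ' '] x ++ [' ', '>', ' ']
            = (pvP '>' [' ', '>', ' '] x ++ [' ']) ++ ['>'] ++ [' '] by simp]
        exact pv_wsTail_trailing _ [' '] '>' (by decide) (by decide)
      rw [hwz, hcls']
      simp [pvAC, pvPad, pvPend, hcls']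
    · obtain ⟨ys1, y1, hsp1, hcy1, hcase1⟩ := pv_splitOn_last '>' x
      have hsuf1 := pv_suffix_of_last '>' x ys1 y1 hcase1
      have ht : pvP '>' [' ', '>', ' '] s
          = (pvP '>' [' ', '>', ' '] x ++ (if pvAllWs y1 = true then [] else pvWsTail x)) ++ [e] := by
        rw [ht0, pvP_concat_nonws '>' e [' ', '>', ' '] x ys1 y1 he he1 hsp1 hsuf1]
      have hyne : pvAllWs y = false := by
        rw [hy, hs, List.append_assoc, pv_lastTok_ext '>' x ([e] ++ w) (by
          simp only [List.all_append, Bool.and_eq_true]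
          exact ⟨by simp [he1], pv_allws_all_ne w '>' hw (by decide)⟩)]
        rw [pv_allWs_append]
        simp [pvAllWs, he]
      have hV : (if pvAllWs y = true then [] else pvWsTail s) = pvWsTail s := by
        rw [hyne]; simp
      rw [hV]
      by_cases he2 : e = '+'
      · subst he2
        have hcls' : pvClassify s = NfcLast.plus := by rw [hcls]; simp
        have hlt : pvLastTok '+' (pvP '>' [' ', '>', ' '] s ++ pvWsTail s) = pvWsTail s := by
          rw [ht]
          exact pv_lastTok_stop '+' _ (pvWsTail s) (pv_allws_all_ne _ '+' (pv_allWs_wsTail s) (by decide))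
        rw [if_pos (show pvAllWs (pvLastTok '+' (pvP '>' [' ', '>', ' '] s ++ pvWsTail s)) = true by
          rw [hlt]; exact pv_allWs_wsTail s), hcls']
        simp [pvAC, pvPad, pvPend, hcls']
      · have hcls' : pvClassify s = NfcLast.none := by rw [hcls]; simp [he1, he2]
        have hlt : pvLastTok '+' (pvP '>' [' ', '>', ' '] s ++ pvWsTail s)
            = pvLastTok '+' (pvP '>' [' ', '>', ' '] x ++ (if pvAllWs y1 = true then [] else pvWsTail x)) ++ ([e] ++ pvWsTail s) := by
          rw [ht, List.append_assoc]
          exact pv_lastTok_ext '+' _ ([e] ++ pvWsTail s) (by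
            simp only [List.all_append, Bool.and_eq_true]
            exact ⟨by simp [he2], pv_allws_all_ne _ '+' (pv_allWs_wsTail s) (by decide)⟩)
        rw [if_neg (show ¬ pvAllWs (pvLastTok '+' (pvP '>' [' ', '>', ' '] s ++ pvWsTail s)) = true by
          rw [hlt, pv_allWs_append, pv_allWs_append]
          simp [pvAllWs, he])]
        have hwz : pvWsTail (pvP '>' [' ', '>', ' '] s ++ pvWsTail s) = pvWsTail s := by
          rw [ht, show ((pvP '>' [' ', '>', ' '] x ++ (if pvAllWs y1 = true then [] else pvWsTail x)) ++ [e]) ++ pvWsTail s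
              = (pvP '>' [' ', '>', ' '] x ++ (if pvAllWs y1 = true then [] else pvWsTail x)) ++ [e] ++ pvWsTail s by simp]
          exact pv_wsTail_trailing _ (pvWsTail s) e he (pv_allWs_wsTail s)
        rw [hwz, hcls']
        simp [pvAC, pvPad, pvPend, hcls', hnws]

-- ===== B-side characterization =====

-- pvG = Source B's space_gt on a '+'-free part;  pvBC = B's whole result
def pvG (y : List Char) : List Char := PySem.Chars.strip (pvP '>' [' ', '>', ' '] y)
def pvBC (s : List Char) : List Char :=
  List.intercalate [' ', '+', ' '] ((List.splitOn '+' s).map pvG)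

lemma pv_lstrip_append (x z : List Char) (hx : pvAllWs x = false) :
    PySem.Chars.lstrip (x ++ z) = PySem.Chars.lstrip x ++ z := by
  simp only [PySem.Chars.lstrip]
  rw [List.dropWhile_append]
  have : (x.dropWhile PySem.Chars.isspace).isEmpty = false := by
    rw [List.isEmpty_eq_false_iff, ne_eq, List.dropWhile_eq_nil_iff]
    intro h
    simp only [pvAllWs] at hx
    rw [List.all_eq_true.mpr (fun a ha => h a ha)] at hx
    exact absurd hx (by simp)
  simp [this]

lemma pv_allWs_pvP (y : List Char) (hy : pvAllWs y = false) :
    pvAllWs (pvP '>' [' ', '>', ' '] y) = false := by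
  rcases pv_shape y with hall | ⟨x, e, w, hs, he, hw, hwT, hcls⟩
  · rw [hall] at hy; exact absurd hy (by simp)
  · have ht0 : pvP '>' [' ', '>', ' '] y = pvP '>' [' ', '>', ' '] (x ++ [e]) := by
      rw [hs]; exact pvP_append_allws '>' _ (x ++ [e]) w hw (by decide)
    by_cases he1 : e = '>'
    · subst he1
      rw [ht0, pvP_concat_self, pv_allWs_append]
      simp [show pvAllWs [' ', '>', ' '] = false by decide]
    · obtain ⟨ys1, y1, hsp1, hcy1, hcase1⟩ := pv_splitOn_last '>' x
      rw [ht0, pvP_concat_nonws '>' e [' ', '>', ' '] x ys1 y1 he he1 hsp1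
        (pv_suffix_of_last '>' x ys1 y1 hcase1), pv_allWs_append]
      simp [pvAllWs, he]

lemma pv_wsTail_pvP (y : List Char) (hy : pvAllWs y = false) :
    pvWsTail (pvP '>' [' ', '>', ' '] y) = pvPad (pvClassify y) := by
  rcases pv_shape y with hall | ⟨x, e, w, hs, he, hw, hwT, hcls⟩
  · rw [hall] at hy; exact absurd hy (by simp)
  · have ht0 : pvP '>' [' ', '>', ' '] y = pvP '>' [' ', '>', ' '] (x ++ [e]) := by
      rw [hs]; exact pvP_append_allws '>' _ (x ++ [e]) w hw (by decide)
    by_cases he1 : e = '>'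
    · subst he1
      rw [ht0, pvP_concat_self, hcls]
      rw [show pvP '>' [' ', '>', ' '] x ++ [' ', '>', ' ']
          = (pvP '>' [' ', '>', ' '] x ++ [' ']) ++ ['>'] ++ [' '] by simp]
      rw [pv_wsTail_trailing _ [' '] '>' (by decide) (by decide)]
      simp [pvPad]
    · obtain ⟨ys1, y1, hsp1, hcy1, hcase1⟩ := pv_splitOn_last '>' x
      rw [ht0, pvP_concat_nonws '>' e [' ', '>', ' '] x ys1 y1 he he1 hsp1
        (pv_suffix_of_last '>' x ys1 y1 hcase1), hcls]
      rw [pv_wsTail_concat_nonws e _ he]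
      by_cases he2 : e = '+' <;> simp [he1, he2, pvPad]

-- classify of a string of the given shape
lemma pv_classify_shape (a w : List Char) (e : Char) (he : PySem.Chars.isspace e = false)
    (hw : pvAllWs w = true) :
    pvClassify (a ++ [e] ++ w) = (if e = '>' then NfcLast.gt else if e = '+' then NfcLast.plus else NfcLast.none) := by
  simp only [pvClassify, List.reverse_append, List.reverse_cons, List.reverse_nil, List.nil_append]
  rw [List.dropWhile_append]
  have h1 : w.reverse.dropWhile PySem.Chars.isspace = [] := by
    simp only [List.dropWhile_eq_nil_iff]
    intro a' ha'
    exact List.all_eq_true.mp (by simpa [pvAllWs] using hw) a' (List.mem_reverse.mp ha')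
  rw [h1]
  simp [List.dropWhile_cons, he]

lemma pv_classify_append_right (a y : List Char) (hy : pvAllWs y = false) :
    pvClassify (a ++ y) = pvClassify y := by
  rcases pv_shape y with hall | ⟨x, e, w, hs, he, hw, hwT, hcls⟩
  · rw [hall] at hy; exact absurd hy (by simp)
  · have h1 : pvClassify (a ++ y) = (if e = '>' then NfcLast.gt else if e = '+' then NfcLast.plus else NfcLast.none) := by
      rw [hs, show a ++ (x ++ [e] ++ w) = (a ++ x) ++ [e] ++ w by simp]
      exact pv_classify_shape _ _ _ he hw
    rw [h1, ← hcls]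

-- on '+'-free input the last non-whitespace character is never '+'
lemma pv_classPlus_not (y : List Char) (hplus : '+' ∉ y) : pvClassify y ≠ NfcLast.plus := by
  rcases pv_shape y with hall | ⟨x, e, w, hs, he, hw, hwT, hcls⟩
  · rw [pv_classify_allws y hall]; exact fun h => NfcLast.noConfusion h
  · rw [hcls]
    by_cases he1 : e = '>'
    · simp [he1]
    · by_cases he2 : e = '+'
      · subst he2; exact absurd (by simp [hs] : '+' ∈ y) hplus
      · simp [he1, he2]

-- for a non-all-whitespace string, the run after the last '>' is whitespace iff the last non-ws char is '>'
lemma pv_classGt_iff (y : List Char) (hy : pvAllWs y = false) :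
    pvClassify y = NfcLast.gt ↔ pvAllWs (pvLastTok '>' y) = true := by
  rcases pv_shape y with hall | ⟨x, e, w, hs, he, hw, hwT, hcls⟩
  · rw [hall] at hy; exact absurd hy (by simp)
  · by_cases he1 : e = '>'
    · subst he1
      constructor
      · intro _
        rw [hs, pv_lastTok_stop '>' x w (pv_allws_all_ne w '>' hw (by decide))]
        exact hw
      · intro _; rw [hcls]; simp
    · have hlt : pvLastTok '>' y = pvLastTok '>' x ++ [e] ++ w := by
        rw [hs, List.append_assoc, pv_lastTok_ext '>' x ([e] ++ w) (by
          simp only [List.all_append, Bool.and_eq_true]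
          exact ⟨by simp [he1], pv_allws_all_ne w '>' hw (by decide)⟩), List.append_assoc]
      constructor
      · intro hg
        rw [hcls] at hg
        by_cases he2 : e = '+' <;> simp [he1, he2] at hg
      · intro hA
        rw [hlt, pv_allWs_append, pv_allWs_append] at hA
        simp [pvAllWs, he] at hA

-- ===== per-part step lemmas for Source B's space_gt =====

lemma pv_G_ws (c : Char) (y : List Char) (hc : PySem.Chars.isspace c = true) :
    pvG (y ++ [c]) = pvG y := by
  have hcg : c ≠ '>' := by intro h; rw [h] at hc; exact absurd hc (by decide)
  rw [pvG, pvG, pvP_concat_ws '>' c _ y hc hcg]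

lemma pv_G_gt (y : List Char) :
    pvG (y ++ ['>']) = pvG y ++ pvPad (pvClassify y) ++
      (if pvAllWs y = true then ['>'] else [' ', '>']) := by
  rw [pvG, pvP_concat_self]
  by_cases hall : pvAllWs y = true
  · rw [pvP_allws '>' _ y hall (by decide), if_pos hall, pvG, pvP_allws '>' _ y hall (by decide),
      pv_classify_allws y hall]
    decide
  · have hall' : pvAllWs y = false := by simpa using hall
    have hP : pvAllWs (pvP '>' [' ', '>', ' '] y) = false := pv_allWs_pvP y hall'
    rw [if_neg hall]
    rw [show pvP '>' [' ', '>', ' '] y ++ [' ', '>', ' ']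
        = ((pvP '>' [' ', '>', ' '] y ++ [' ']) ++ ['>']) ++ [' '] by simp]
    rw [pv_strip_concat_ws ' ' _ (by decide), pv_strip_concat_nonws '>' _ (by decide),
      pv_lstrip_append _ [' '] hP, pv_lstrip_eq_strip_wsTail _ hP, pv_wsTail_pvP y hall']
    simp [pvG]

lemma pv_G_norm (c : Char) (y : List Char) (hc : PySem.Chars.isspace c = false)
    (hc1 : c ≠ '>') (hplus : '+' ∉ y) :
    pvG (y ++ [c]) = pvG y ++ pvPad (pvClassify y) ++ pvPend y ++ [c] := by
  obtain ⟨ys1, y1, hsp1, hcy1, hcase1⟩ := pv_splitOn_last '>' y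
  have hy1 := pv_lastTok_eq '>' y ys1 y1 hcy1 hcase1
  have h1 := pvP_concat_nonws '>' c [' ', '>', ' '] y ys1 y1 hc hc1 hsp1
    (pv_suffix_of_last '>' y ys1 y1 hcase1)
  rw [pvG, h1]
  by_cases hall : pvAllWs y = true
  · have hy1y : y1 = y := by
      rcases hcase1 with ⟨_, h', _⟩ | ⟨_, pre, hpre⟩
      · exact h'
      · exact absurd (by simp [hpre] : '>' ∈ y) (pv_not_mem_allws y '>' hall (by decide))
    rw [hy1y, if_pos hall, pvP_allws '>' _ y hall (by decide)]
    rw [pvG, pvP_allws '>' _ y hall (by decide), pv_classify_allws y hall,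
      show pvPend y = [] by simp [pvPend, hall]]
    simp [pvPad, PySem.Chars.strip, PySem.Chars.lstrip, PySem.Chars.rstrip, List.dropWhile_cons, hc]
  · have hall' : pvAllWs y = false := by simpa using hall
    have hP : pvAllWs (pvP '>' [' ', '>', ' '] y) = false := pv_allWs_pvP y hall'
    rw [show pvP '>' [' ', '>', ' '] y ++ (if pvAllWs y1 = true then [] else pvWsTail y) ++ [c]
        = (pvP '>' [' ', '>', ' '] y ++ (if pvAllWs y1 = true then [] else pvWsTail y)) ++ [c] by simp,
      pv_strip_concat_nonws c _ hc, pv_lstrip_append _ _ hP, pv_lstrip_eq_strip_wsTail _ hP,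
      pv_wsTail_pvP y hall']
    have hVpend : (if pvAllWs y1 = true then ([] : List Char) else pvWsTail y) = pvPend y := by
      by_cases hA : pvAllWs y1 = true
      · have hg : pvClassify y = NfcLast.gt := (pv_classGt_iff y hall').mpr (hy1 ▸ hA)
        rw [if_pos hA, pvPend, if_neg (by simp [hg])]
      · have hng : pvClassify y ≠ NfcLast.gt := by
          intro hg
          exact hA (hy1 ▸ (pv_classGt_iff y hall').mp hg)
        have hcl : pvClassify y = NfcLast.none := by
          cases hcl : pvClassify y with
          | none => rfl
          | gt => exact absurd hcl hng
          | plus => exact absurd hcl (pv_classPlus_not y hplus)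
        rw [if_neg hA, pvPend, if_pos ⟨hall', hcl⟩]
    rw [hVpend]
    simp [pvG]

-- appending to the last element of an intercalated list
lemma pv_intercalate_last_append (sep d : List Char) (l : List (List Char)) (a : List Char) :
    List.intercalate sep (l ++ [a ++ d]) = List.intercalate sep (l ++ [a]) ++ d := by
  cases l with
  | nil => simp [List.intercalate]
  | cons z zs =>
    rw [pv_intercalate_concat _ _ _ (by simp), pv_intercalate_concat _ _ _ (by simp)]
    simp

-- ===== whole-string step lemmas for B =====

lemma pv_BC_plus (s : List Char) : pvBC (s ++ ['+']) = pvBC s ++ [' ', '+', ' '] := by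
  rw [pvBC, pvBC, pv_splitOn_concat_self, List.map_append]
  simp only [List.map_cons, List.map_nil]
  rw [pv_intercalate_concat _ _ _ (by simp [pv_splitOn_ne_nil])]
  simp [show pvG [] = [] by decide]

lemma pv_BC_ws (c : Char) (s : List Char) (hc : PySem.Chars.isspace c = true) :
    pvBC (s ++ [c]) = pvBC s := by
  have hcp : c ≠ '+' := by intro h; rw [h] at hc; exact absurd hc (by decide)
  obtain ⟨ys, y, hsp, hcy, hcase⟩ := pv_splitOn_last '+' s
  rw [pvBC, pvBC, pv_splitOn_concat_ne '+' c hcp, hsp, List.modifyLast_concat, List.map_append,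
    List.map_append]
  simp only [List.map_cons, List.map_nil]
  rw [pv_G_ws c y hc]

lemma pv_BC_gt (s : List Char) :
    pvBC (s ++ ['>']) = pvBC s ++ pvPad (pvClassify s) ++
      (if pvAllWs s = true ∨ pvClassify s = NfcLast.plus then ['>'] else [' ', '>']) := by
  obtain ⟨ys, y, hsp, hcy, hcase⟩ := pv_splitOn_last '+' s
  rw [pvBC, pvBC, pv_splitOn_concat_ne '+' '>' (by decide), hsp, List.modifyLast_concat,
    List.map_append, List.map_append]
  simp only [List.map_cons, List.map_nil]
  rw [pv_G_gt y, show pvG y ++ pvPad (pvClassify y) ++ (if pvAllWs y = true then ['>'] else [' ', '>'])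
      = pvG y ++ (pvPad (pvClassify y) ++ (if pvAllWs y = true then ['>'] else [' ', '>'])) by simp,
    pv_intercalate_last_append]
  have hBC : [' ', '+', ' '].intercalate (List.map pvG ys ++ [pvG y]) = pvBC s := by
    rw [pvBC, hsp, List.map_append]; rfl
  rw [hBC]
  rcases hcase with ⟨hys, hy, hps⟩ | ⟨hysne, pre, hpre⟩
  · -- no '+' in s: y = s
    subst hy
    by_cases hall : pvAllWs y = true
    · rw [if_pos hall, if_pos (Or.inl hall)]
      simp
    · have hall' : pvAllWs y = false := by simpa using hall
      rw [if_neg hall, if_neg (by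
        rintro (h | h)
        · exact hall h
        · exact pv_classPlus_not y hcy h)]
      simp
  · -- s = pre ++ '+' ++ y
    have hnws : pvAllWs s = false := by
      rw [hpre, pv_allWs_append, pv_allWs_append]
      simp [show pvAllWs ['+'] = false by decide]
    by_cases hall : pvAllWs y = true
    · have hcls : pvClassify s = NfcLast.plus := by
        rw [hpre, List.append_assoc, show [('+' : Char)] ++ y = [] ++ ['+'] ++ y by simp,
          ← List.append_assoc, ← List.append_assoc, pv_classify_shape _ _ _ (by decide) hall]
        simp
      rw [if_pos hall, if_pos (Or.inr hcls), hcls, pv_classify_allws y hall]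
      simp [pvPad]
    · have hall' : pvAllWs y = false := by simpa using hall
      have hcls : pvClassify s = pvClassify y := by
        rw [hpre, List.append_assoc]; exact pv_classify_append_right _ _ (by
          rw [pv_allWs_append]; simp [show pvAllWs ['+'] = false by decide])
          |>.trans (pv_classify_append_right _ _ hall')
      rw [if_neg hall, if_neg (by
        rintro (h | h)
        · rw [h] at hnws; exact absurd hnws (by simp)
        · exact pv_classPlus_not y hcy (hcls ▸ h)), hcls]
      simp

lemma pv_BC_norm (c : Char) (s : List Char) (hc : PySem.Chars.isspace c = false)
    (hc1 : c ≠ '>') (hc2 : c ≠ '+') :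
    pvBC (s ++ [c]) = pvBC s ++ pvPad (pvClassify s) ++ pvPend s ++ [c] := by
  obtain ⟨ys, y, hsp, hcy, hcase⟩ := pv_splitOn_last '+' s
  rw [pvBC, pvBC, pv_splitOn_concat_ne '+' c hc2, hsp, List.modifyLast_concat,
    List.map_append, List.map_append]
  simp only [List.map_cons, List.map_nil]
  rw [pv_G_norm c y hc hc1 hcy, show pvG y ++ pvPad (pvClassify y) ++ pvPend y ++ [c]
      = pvG y ++ (pvPad (pvClassify y) ++ pvPend y ++ [c]) by simp,
    pv_intercalate_last_append]
  have hBC : [' ', '+', ' '].intercalate (List.map pvG ys ++ [pvG y]) = pvBC s := by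
    rw [pvBC, hsp, List.map_append]; rfl
  rw [hBC]
  rcases hcase with ⟨hys, hy, hps⟩ | ⟨hysne, pre, hpre⟩
  · subst hy; simp
  · have hnws : pvAllWs s = false := by
      rw [hpre, pv_allWs_append, pv_allWs_append]
      simp [show pvAllWs ['+'] = false by decide]
    by_cases hall : pvAllWs y = true
    · have hcls : pvClassify s = NfcLast.plus := by
        rw [hpre, List.append_assoc, show [('+' : Char)] ++ y = [] ++ ['+'] ++ y by simp,
          ← List.append_assoc, ← List.append_assoc, pv_classify_shape _ _ _ (by decide) hall]
        simp
      rw [hcls, pv_classify_allws y hall,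
        show pvPend y = [] by simp [pvPend, hall],
        show pvPend s = [] by simp [pvPend, hcls]]
      simp [pvPad]
    · have hall' : pvAllWs y = false := by simpa using hall
      have hcls : pvClassify s = pvClassify y := by
        rw [hpre, List.append_assoc]; exact pv_classify_append_right _ _ (by
          rw [pv_allWs_append]; simp [show pvAllWs ['+'] = false by decide])
          |>.trans (pv_classify_append_right _ _ hall')
      have hwt : pvWsTail s = pvWsTail y := by
        rw [hpre, List.append_assoc]
        exact (pv_wsTail_append _ _ (by
          rw [pv_allWs_append]; simp [show pvAllWs ['+'] = false by decide])).trans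
          (pv_wsTail_append _ _ hall')
      have hpend : pvPend s = pvPend y := by
        rw [pvPend, pvPend, hcls, hall', hnws, hwt]
      rw [hcls, hpend]
      simp

-- ===== the commutation theorem: A's two passes equal B's per-part pass =====

lemma pv_AC_eq_BC (s : List Char) : pvAC s = pvBC s := by
  induction s using List.reverseRecOn with
  | nil => decide
  | append_singleton s c ih =>
    by_cases h1 : c = '>'
    · subst h1; rw [pv_LA_gt, pv_BC_gt, ih]
    · by_cases h2 : c = '+'
      · subst h2; rw [pv_LA_plus, pv_BC_plus, ih]
      · by_cases h3 : PySem.Chars.isspace c = true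
        · rw [pv_LA_ws c s h3, pv_BC_ws c s h3, ih]
        · rw [pv_LA_norm c s (by simpa using h3) h1 h2,
            pv_BC_norm c s (by simpa using h3) h1 h2, ih]

lemma pv_portA (f : String) : normalize_field_choice f = String.ofList (pvAC f.toList) := by
  show String.ofList _ = _
  rw [pvAC, pvP, pvP, ← pv_splitOn_bridge, ← pv_splitOn_bridge]
  rfl

lemma pv_portB (f : String) : normalize_field_choice_alt f = String.ofList (pvBC f.toList) := by
  have hG : nfcSpaceGt = pvG := by
    funext p
    rw [pvG, pvP, ← pv_splitOn_bridge]
    rfl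
  rw [normalize_field_choice_alt, pvBC, ← pv_splitOn_bridge, hG]
  rfl

-- ===== VERDICT (by name: the statement is the Claim_ definition above) =====
theorem normalize_field_choice_spec : Claim_equal_normalize_field_choice := by
  intro field_choice _
  show normalize_field_choice field_choice = normalize_field_choice_alt field_choice
  rw [pv_portA, pv_portB, pv_AC_eq_BC]
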